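-- pv_equiv track=rewrite | github.com/lGRlili/causal-embedding-and-boosting | code/API/text_preprocessing.py | gut_remove_heda_tail
-- ===== SOURCE A (Python) =====
-- def gut_remove_heda_tail(lines):
--     start_flag = ['START OF THIS PROJECT GUTENBERG EBOOK', 'START OF THE PROJECT GUTENBERG EBOOK',
--                   'THE SMALL PRINT! FOR PUBLIC DOMAIN ETEXTS', '["Small Print" V.12.08.93]']
--     end_flag = ['END OF THIS PROJECT GUTENBERG EBOOK', 'END OF THE PROJECT GUTENBERG EBOOK',
--                 '**The Legal Small Print**']
--
--     start_id = [i for i, x in enumerate(lines) if (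
--                 (x.find(start_flag[0]) != -1) or (x.find(start_flag[1]) != -1) or (x.find(start_flag[2]) != -1) or (
--                     x.find(start_flag[3]) != -1))]
--     end_id = [i for i, x in enumerate(lines) if
--               ((x.find(end_flag[0]) != -1) or (x.find(end_flag[1]) != -1) or (x.find(end_flag[2]) != -1))]
--     # 获取文本的首部和尾部
--     if len(start_id) != 0:
--         start_id_max = max(start_id) + 1
--     else:
--         start_id_max = 0
--     if len(end_id) != 0:
--         end_id_min = min(end_id) - 1
--     else:
--         end_id_min = len(lines)
--     # 获得文章正文
--     choose_lines = lines[start_id_max:end_id_min + 1]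
--
--     return choose_lines
-- ===== SOURCE B (Python) =====
-- def gut_remove_heda_tail(lines):
--     start_flag = ['START OF THIS PROJECT GUTENBERG EBOOK', 'START OF THE PROJECT GUTENBERG EBOOK',
--                   'THE SMALL PRINT! FOR PUBLIC DOMAIN ETEXTS', '["Small Print" V.12.08.93]']
--     end_flag = ['END OF THIS PROJECT GUTENBERG EBOOK', 'END OF THE PROJECT GUTENBERG EBOOK',
--                 '**The Legal Small Print**']
--     # body starts after the LAST start marker: scan backwards, stop at the first hit
--     start = 0
--     for i in range(len(lines) - 1, -1, -1):
--         if any(flag in lines[i] for flag in start_flag):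
--             start = i + 1
--             break
--     # body ends before the FIRST end marker: scan forwards, stop at the first hit
--     end = len(lines)
--     for i, x in enumerate(lines):
--         if any(flag in x for flag in end_flag):
--             end = i
--             break
--     return lines[start:end]
-- ===== Notes on version B (the rewrite author's own statement) =====
-- stated objective: alternative
-- what changed: A materializes the full lists of all start/end marker indices and takes max/min with an off-by-one slice; B does two early-exit scans - backwards for the last start marker, forwards for the first end marker - and slices directly.
import Mathlib
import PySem

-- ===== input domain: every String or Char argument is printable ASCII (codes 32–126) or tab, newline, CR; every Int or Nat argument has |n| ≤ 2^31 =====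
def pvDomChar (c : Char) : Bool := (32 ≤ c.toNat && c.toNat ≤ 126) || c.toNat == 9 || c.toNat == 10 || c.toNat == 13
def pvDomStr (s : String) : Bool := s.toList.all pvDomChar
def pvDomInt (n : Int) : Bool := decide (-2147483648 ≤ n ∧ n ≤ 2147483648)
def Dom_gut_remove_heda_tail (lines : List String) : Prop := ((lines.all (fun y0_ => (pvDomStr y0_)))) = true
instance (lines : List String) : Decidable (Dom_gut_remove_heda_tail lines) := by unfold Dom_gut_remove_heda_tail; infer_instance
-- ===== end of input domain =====

-- B replaces A's build-all-indices-then-max/min with two early-exit scans (backwards for the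
-- last start marker, forwards for the first end marker); objective: alternative decomposition.

-- ===== PORT A =====
-- the line-comprehension predicates of A, spelled with str.find as in the source
def gutStartP (x : String) : Bool :=
  (PySem.Str.find x "START OF THIS PROJECT GUTENBERG EBOOK" != -1) ||
  (PySem.Str.find x "START OF THE PROJECT GUTENBERG EBOOK" != -1) ||
  (PySem.Str.find x "THE SMALL PRINT! FOR PUBLIC DOMAIN ETEXTS" != -1) ||
  (PySem.Str.find x "[\"Small Print\" V.12.08.93]" != -1)

def gutEndP (x : String) : Bool :=
  (PySem.Str.find x "END OF THIS PROJECT GUTENBERG EBOOK" != -1) ||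
  (PySem.Str.find x "END OF THE PROJECT GUTENBERG EBOOK" != -1) ||
  (PySem.Str.find x "**The Legal Small Print**" != -1)

def gut_remove_heda_tail (lines : List String) : List String :=
  let start_id : List Int :=
    ((PySem.List.enumerate lines 0).filter (fun p => gutStartP p.2)).map (·.1)
  let end_id : List Int :=
    ((PySem.List.enumerate lines 0).filter (fun p => gutEndP p.2)).map (·.1)
  let start_id_max : Int :=
    match PySem.List.max? start_id (fun y => y) with
    | some m => m + 1
    | none => 0
  let end_id_min : Int :=
    match PySem.List.min? end_id (fun y => y) with
    | some m => m - 1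
    | none => (lines.length : Int)
  PySem.List.slice lines (some start_id_max) (some (end_id_min + 1))

-- ===== PORT B =====
def altStartFlags : List String :=
  ["START OF THIS PROJECT GUTENBERG EBOOK", "START OF THE PROJECT GUTENBERG EBOOK",
   "THE SMALL PRINT! FOR PUBLIC DOMAIN ETEXTS", "[\"Small Print\" V.12.08.93]"]

def altEndFlags : List String :=
  ["END OF THIS PROJECT GUTENBERG EBOOK", "END OF THE PROJECT GUTENBERG EBOOK",
   "**The Legal Small Print**"]

-- any(flag in x for flag in start_flag)
def altHasStart (x : String) : Bool := altStartFlags.any (fun f => PySem.Str.isIn f x)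
def altHasEnd (x : String) : Bool := altEndFlags.any (fun f => PySem.Str.isIn f x)

-- backwards scan: for i in range(len(lines)-1, -1, -1): … break
def altStartLoop : List (Int × String) → Int
  | [] => 0
  | (i, x) :: rest => if altHasStart x then i + 1 else altStartLoop rest

-- forwards scan: for i, x in enumerate(lines): … break
def altEndLoop (n : Int) : List (Int × String) → Int
  | [] => n
  | (i, x) :: rest => if altHasEnd x then i else altEndLoop n rest

def gut_remove_heda_tail_alt (lines : List String) : List String :=
  let start := altStartLoop (PySem.List.enumerate lines 0).reverse
  let stop := altEndLoop (lines.length : Int) (PySem.List.enumerate lines 0)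
  PySem.List.slice lines (some start) (some stop)

-- ===== PRECONDITION & SPEC =====
def Spec_gut_remove_heda_tail (lines : List String) (out : List String) : Prop := out = gut_remove_heda_tail_alt lines
instance (lines : List String) (out : List String) : Decidable (Spec_gut_remove_heda_tail lines out) := by unfold Spec_gut_remove_heda_tail; infer_instance

-- ===== CLAIM (what is proved, stated in full; the proofs are below) =====
def Claim_equal_gut_remove_heda_tail : Prop := ∀ (lines : List String), Dom_gut_remove_heda_tail lines → Spec_gut_remove_heda_tail lines (gut_remove_heda_tail lines)

-- ===== LEMMAS AND PROOFS =====

lemma find_bne_eq_isIn (s sub : List Char) :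
    (PySem.Chars.find s sub != -1) = PySem.Chars.isIn sub s := by
  by_cases h : sub <:+: s
  · have h1 : PySem.Chars.isIn sub s = true := (PySem.Chars.isIn_iff_infix sub s).mpr h
    have h2 : PySem.Chars.find s sub ≠ -1 := fun hc => ((PySem.Chars.find_eq_neg_one_iff s sub).mp hc) h
    simp [h1, h2]
  · have h1 : PySem.Chars.find s sub = -1 := (PySem.Chars.find_eq_neg_one_iff s sub).mpr h
    have h2 : PySem.Chars.isIn sub s = false := by
      rcases Bool.eq_false_or_eq_true (PySem.Chars.isIn sub s) with hb | hb
      · exact absurd ((PySem.Chars.isIn_iff_infix sub s).mp hb) h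
      · exact hb
    simp [h1, h2]

lemma gutStartP_eq (x : String) : gutStartP x = altHasStart x := by
  simp only [gutStartP, altHasStart, altStartFlags, List.any_cons, List.any_nil,
    PySem.Str.isIn_eq, PySem.Str.find_eq, find_bne_eq_isIn, Bool.or_false]
  ac_rfl

lemma gutEndP_eq (x : String) : gutEndP x = altHasEnd x := by
  simp only [gutEndP, altHasEnd, altEndFlags, List.any_cons, List.any_nil,
    PySem.Str.isIn_eq, PySem.Str.find_eq, find_bne_eq_isIn, Bool.or_false]
  ac_rfl

lemma altStartLoop_append (l₁ l₂ : List (Int × String)) :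
    altStartLoop (l₁ ++ l₂) =
      if l₁.any (fun e => altHasStart e.2) then altStartLoop l₁ else altStartLoop l₂ := by
  induction l₁ with
  | nil => simp [altStartLoop]
  | cons e t ih =>
    obtain ⟨i, x⟩ := e
    by_cases h : altHasStart x = true
    · simp [altStartLoop, h]
    · have h' : altHasStart x = false := Bool.eq_false_iff.mpr h
      simp only [List.cons_append, altStartLoop, h', Bool.false_eq_true, if_false, ih,
        List.any_cons, Bool.false_or]

lemma foldl_min_of_le (t : List Int) (a : Int) (h : ∀ y ∈ t, a ≤ y) :
    t.foldl min a = a := by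
  induction t generalizing a with
  | nil => rfl
  | cons r rs ih =>
    have hr : min a r = a := min_eq_left (h r (by simp))
    simp only [List.foldl_cons, hr]
    exact ih a (fun y hy => h y (by simp [hy]))

lemma filter_eq_nil_of_any_false (l : List (Int × String)) (p : String → Bool)
    (h : l.any (fun e => p e.2) = false) : l.filter (fun e => p e.2) = [] := by
  simp only [List.any_eq_false] at h
  simpa [List.filter_eq_nil_iff] using h

lemma mem_ids_lb (xs : List String) (s : Int) (p : String → Bool) (y : Int)
    (hy : y ∈ ((PySem.List.enumerate xs s).filter (fun e => p e.2)).map (·.1)) : s ≤ y := by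
  simp only [List.mem_map, List.mem_filter] at hy
  obtain ⟨e, ⟨he, _⟩, rfl⟩ := hy
  obtain ⟨k, hk, rfl⟩ := (PySem.List.mem_enumerate_iff xs s e).mp he
  show s ≤ s + (k : Int)
  omega

lemma start_scan_eq (xs : List String) (s : Int) :
    altStartLoop ((PySem.List.enumerate xs s).reverse) =
      match PySem.List.max?
          (((PySem.List.enumerate xs s).filter (fun p => altHasStart p.2)).map (·.1))
          (fun y => y) with
      | some m => m + 1
      | none => 0 := by
  induction xs generalizing s with
  | nil => simp [PySem.List.enumerate, altStartLoop, PySem.List.max?]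
  | cons x t ih =>
    rw [PySem.List.enumerate_cons, List.reverse_cons, altStartLoop_append, List.any_reverse]
    simp only [List.filter_cons]
    by_cases hx : altHasStart x = true
    · simp only [hx, if_true, List.map_cons]
      by_cases hany : (PySem.List.enumerate t (s + 1)).any (fun e => altHasStart e.2) = true
      · 
        -- a later match exists: A's max ignores the smaller index s
        simp only [hany, if_true]
        rw [ih (s + 1)]
        set ids := ((PySem.List.enumerate t (s + 1)).filter (fun p => altHasStart p.2)).map (·.1) with hids
        have hne : ids ≠ [] := by
          simp only [List.any_eq_true] at hany
          obtain ⟨e, he, hpe⟩ := hany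
          simp only [hids, ne_eq, List.map_eq_nil_iff, List.filter_eq_nil_iff, not_forall]
          exact ⟨e, he, by simpa using hpe⟩
        obtain ⟨r, rs, hrrs⟩ := List.exists_cons_of_ne_nil hne
        have hsr : s ≤ r := by
          have := mem_ids_lb t (s + 1) altHasStart r (by rw [← hids, hrrs]; simp)
          omega
        rw [hrrs, PySem.List.max?_id_cons, PySem.List.max?_id_cons]
        simp [List.foldl_cons, max_eq_right hsr]
      · -- no later match: the reverse scan falls through to (s, x)
        have hany' : ((PySem.List.enumerate t (s + 1)).any fun e => altHasStart e.2) = false :=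
          Bool.eq_false_iff.mpr hany
        simp only [hany', if_false, altStartLoop, hx, if_true, Bool.false_eq_true]
        rw [filter_eq_nil_of_any_false _ _ hany']
        simp [PySem.List.max?_id_cons]
    · have hx' : altHasStart x = false := Bool.eq_false_iff.mpr hx
      simp only [hx', Bool.false_eq_true, if_false]
      by_cases hany : (PySem.List.enumerate t (s + 1)).any (fun e => altHasStart e.2) = true
      · simp only [hany, if_true]; exact ih (s + 1)
      · have hany' : ((PySem.List.enumerate t (s + 1)).any fun e => altHasStart e.2) = false :=
          Bool.eq_false_iff.mpr hany
        simp only [hany', Bool.false_eq_true, if_false, altStartLoop]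
        rw [filter_eq_nil_of_any_false _ _ hany']
        simp [PySem.List.max?, hx']

lemma end_scan_eq (xs : List String) (s n : Int) :
    altEndLoop n (PySem.List.enumerate xs s) =
      match PySem.List.min?
          (((PySem.List.enumerate xs s).filter (fun p => altHasEnd p.2)).map (·.1))
          (fun y => y) with
      | some m => m
      | none => n := by
  induction xs generalizing s with
  | nil => simp [PySem.List.enumerate, altEndLoop, PySem.List.min?]
  | cons x t ih =>
    rw [PySem.List.enumerate_cons]
    simp only [altEndLoop, List.filter_cons]
    by_cases hx : altHasEnd x
    · simp only [hx, if_pos, List.map_cons, PySem.List.min?_id_cons]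
      have : (((PySem.List.enumerate t (s + 1)).filter (fun p => altHasEnd p.2)).map (·.1)).foldl min s = s :=
        foldl_min_of_le _ s (fun y hy => le_of_lt (by have := mem_ids_lb t (s + 1) altHasEnd y hy; omega))
      simp [this]
    · simp only [hx, Bool.false_eq_true, if_neg, not_false_iff]
      exact ih (s + 1)

lemma altStartLoop_nonneg (l : List (Int × String)) (h : ∀ e ∈ l, 0 ≤ e.1) :
    0 ≤ altStartLoop l := by
  induction l with
  | nil => simp [altStartLoop]
  | cons e t ih =>
    obtain ⟨i, x⟩ := e
    by_cases hx : altHasStart x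
    · simp only [altStartLoop, hx, if_pos]
      have := h (i, x) (by simp); omega
    · simp only [altStartLoop, hx, Bool.false_eq_true, if_neg, not_false_iff]
      exact ih (fun e he => h e (by simp [he]))

lemma slice_len_succ {α : Type} (xs : List α) (a : Int) (ha : 0 ≤ a) :
    PySem.List.slice xs (some a) (some ((xs.length : Int) + 1)) =
      PySem.List.slice xs (some a) (some (xs.length : Int)) := by
  rw [PySem.List.slice_toNat xs ha (by positivity), PySem.List.slice_toNat xs ha (by omega)]
  have h1 : ((xs.length : Int) + 1).toNat = xs.length + 1 := by omega
  have h2 : ((xs.length : Int)).toNat = xs.length := by omega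
  rw [h1, h2]
  have hd : (xs.drop a.toNat).length = xs.length - a.toNat := List.length_drop
  rw [List.take_of_length_le (by omega), List.take_of_length_le (by omega)]

-- ===== VERDICT (by name: the statement is the Claim_ definition above) =====
theorem gut_remove_heda_tail_spec : Claim_equal_gut_remove_heda_tail := by
  intro lines _
  unfold Spec_gut_remove_heda_tail gut_remove_heda_tail gut_remove_heda_tail_alt
  have hS : (fun p : Int × String => gutStartP p.2) = (fun p => altHasStart p.2) :=
    funext fun p => gutStartP_eq p.2
  have hE : (fun p : Int × String => gutEndP p.2) = (fun p => altHasEnd p.2) :=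
    funext fun p => gutEndP_eq p.2
  simp only [hS, hE]
  have h0 : 0 ≤ altStartLoop (PySem.List.enumerate lines 0).reverse := by
    apply altStartLoop_nonneg
    intro e he
    rw [List.mem_reverse] at he
    obtain ⟨k, hk, rfl⟩ := (PySem.List.mem_enumerate_iff lines 0 e).mp he
    simp
  rw [← start_scan_eq lines 0, end_scan_eq lines 0 ((lines.length : Int))]
  rcases hmin : PySem.List.min?
      (((PySem.List.enumerate lines 0).filter (fun p => altHasEnd p.2)).map (·.1))
      (fun y => y) with _ | m
  · simp only [hmin]
    exact slice_len_succ lines _ h0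
  · simp only [hmin]
    have : m - 1 + 1 = m := by omega
    rw [this]
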